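-- pv_equiv track=rewrite | github.com/Hsiangpo/OldIron | former/Japan/src/site_agent/crawler/__init__.py | _summarize_error_message
-- ===== SOURCE A (Python) =====
-- def _summarize_error_message(message: str) -> str:
--     msg = (message or "").strip()
--     if not msg:
--         return "crawl_failed"
--
--     lines = [line.strip() for line in msg.splitlines() if line.strip()]
--
--     for line in lines:
--         if "net::" in line:
--             return line
--
--     for line in lines:
--         if "timeout" in line.lower():
--             return line
--
--     head = " | ".join(lines[:3]) if lines else msg
--     if len(head) > 400:
--         head = head[:400] + "…"
--     return head
-- ===== SOURCE B (Python) =====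
-- def _summarize_error_message(message: str) -> str:
--     msg = (message or "").strip()
--     if not msg:
--         return "crawl_failed"
--
--     lines = [line.strip() for line in msg.splitlines() if line.strip()]
--
--     # Classify-and-select: every relevant line gets a priority rank
--     # (0 = network error, 1 = timeout); the answer is the minimum
--     # (rank, position, line) tuple, i.e. best rank, earliest position.
--     candidates = [
--         (0 if "net::" in line else 1, i, line)
--         for i, line in enumerate(lines)
--         if "net::" in line or "timeout" in line.lower()
--     ]
--     if candidates:
--         return min(candidates)[2]
--
--     head = " | ".join(lines[:3]) if lines else msg
--     if len(head) > 400: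
--         head = head[:400] + "…"
--     return head
-- ===== Notes on version B (the rewrite author's own statement) =====
-- stated objective: alternative
-- what changed: Instead of A's two staged priority scans, B classifies each relevant line with a numeric priority rank (0 for 'net::', 1 for 'timeout'), builds one candidate list of (rank, index, line) tuples, and selects the answer as min() of that list; the head/truncation fallback is unchanged.
import Mathlib
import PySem

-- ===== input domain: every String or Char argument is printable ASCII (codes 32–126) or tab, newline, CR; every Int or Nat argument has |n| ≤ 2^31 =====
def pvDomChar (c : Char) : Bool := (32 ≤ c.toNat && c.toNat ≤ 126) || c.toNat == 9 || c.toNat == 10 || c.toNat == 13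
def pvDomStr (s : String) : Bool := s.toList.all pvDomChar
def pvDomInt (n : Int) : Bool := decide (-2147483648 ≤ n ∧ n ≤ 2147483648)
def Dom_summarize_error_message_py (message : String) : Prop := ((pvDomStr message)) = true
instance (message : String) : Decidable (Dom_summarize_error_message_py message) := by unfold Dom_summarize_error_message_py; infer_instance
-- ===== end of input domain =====

-- B replaces A's two staged priority scans by a classify-and-select algorithm:
-- each relevant line is tagged with a priority rank and the answer is min() of
-- (rank, index, line) tuples (alternative decomposition, same cost).

-- ===== PORT A =====
-- lines = [line.strip() for line in msg.splitlines() if line.strip()]   (shared by A and B verbatim)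
def pvCleanLines (msg : String) : List String :=
  ((PySem.Str.splitlines msg).filter
    (fun l => PySem.Str.len (PySem.Str.strip l) ≠ 0)).map PySem.Str.strip

-- head = " | ".join(lines[:3]) if lines else msg; truncate to 400 + "…"   (shared final lines of A and B)
def pvHead (msg : String) (lines : List String) : String :=
  let head := if lines ≠ [] then PySem.Str.join " | " (PySem.List.slice lines none (some 3)) else msg
  if 400 < PySem.Str.len head then (PySem.Str.slice head none (some 400)) ++ "…" else head

-- first loop of A: return the first line containing "net::"
def pvFindNet : List String → Option String
  | [] => none
  | l :: rest => if PySem.Str.isIn "net::" l then some l else pvFindNet rest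

-- second loop of A: return the first line whose lowercase contains "timeout"
def pvFindTimeout : List String → Option String
  | [] => none
  | l :: rest => if PySem.Str.isIn "timeout" (PySem.Str.lower l) then some l else pvFindTimeout rest

-- A after the empty-message guard: two scans, then the head fallback
def pvBodyA (msg : String) : String :=
  match pvFindNet (pvCleanLines msg) with
  | some l => l
  | none =>
    match pvFindTimeout (pvCleanLines msg) with
    | some l => l
    | none => pvHead msg (pvCleanLines msg)

def summarize_error_message_py (message : String) : String :=
  if PySem.Str.len (PySem.Str.strip message) = 0 then "crawl_failed"
  else pvBodyA (PySem.Str.strip message)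

-- ===== PORT B =====
-- 0 if "net::" in line else 1
def pvRank (l : String) : Int := if PySem.Str.isIn "net::" l then 0 else 1

-- candidates = [(0 if "net::" in l else 1, i, l) for i, l in enumerate(lines) if "net::" in l or "timeout" in l.lower()]
def pvCands (lines : List String) : List (Int × Int × String) :=
  (PySem.List.enumerate lines 0).filterMap (fun p =>
    if PySem.Str.isIn "net::" p.2 || PySem.Str.isIn "timeout" (PySem.Str.lower p.2)
    then some (pvRank p.2, p.1, p.2) else none)

-- Python's tuple '<' on (int, int, str), exact: lexicographic; str '<' is Lean's String '<' (code points)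
def pvLt (a b : Int × Int × String) : Bool :=
  decide (a.1 < b.1) ||
    (decide (a.1 = b.1) && (decide (a.2.1 < b.2.1) ||
      (decide (a.2.1 = b.2.1) && decide (a.2.2 < b.2.2))))

-- min(candidates): running minimum keeping the FIRST minimal element (Python's min)
def pvMinFold (c : Int × Int × String) (cs : List (Int × Int × String)) : Int × Int × String :=
  cs.foldl (fun best x => if pvLt x best then x else best) c

-- B after the empty-message guard: classify, select the minimum, else the same head fallback
def pvBodyB (msg : String) : String :=
  match pvCands (pvCleanLines msg) with
  | c :: cs => (pvMinFold c cs).2.2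
  | [] => pvHead msg (pvCleanLines msg)

def summarize_error_message_py_alt (message : String) : String :=
  if PySem.Str.len (PySem.Str.strip message) = 0 then "crawl_failed"
  else pvBodyB (PySem.Str.strip message)

-- ===== PRECONDITION & SPEC =====
def Spec_summarize_error_message_py (message : String) (out : String) : Prop := out = summarize_error_message_py_alt message
instance (message : String) (out : String) : Decidable (Spec_summarize_error_message_py message out) := by unfold Spec_summarize_error_message_py; infer_instance

-- ===== CLAIM (what is proved, stated in full; the proofs are below) =====
def Claim_equal_summarize_error_message_py : Prop := ∀ (message : String), Dom_summarize_error_message_py message → Spec_summarize_error_message_py message (summarize_error_message_py message)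

-- ===== LEMMAS AND PROOFS =====

-- proof-side recursive form of the enumerate comprehension, with starting index i0
def pvCandFrom (i0 : Int) : List String → List (Int × Int × String)
  | [] => []
  | l :: rest =>
    (if PySem.Str.isIn "net::" l || PySem.Str.isIn "timeout" (PySem.Str.lower l)
     then [(pvRank l, i0, l)] else []) ++ pvCandFrom (i0 + 1) rest

theorem pvCands_eq_candFrom (lines : List String) (i0 : Int) :
    (PySem.List.enumerate lines i0).filterMap (fun p =>
      if PySem.Str.isIn "net::" p.2 || PySem.Str.isIn "timeout" (PySem.Str.lower p.2)
      then some (pvRank p.2, p.1, p.2) else none) = pvCandFrom i0 lines := by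
  induction lines generalizing i0 with
  | nil => rfl
  | cons l rest ih =>
    rw [PySem.List.enumerate_cons]
    simp only [List.filterMap_cons, pvCandFrom]
    by_cases h : (PySem.Str.isIn "net::" l || PySem.Str.isIn "timeout" (PySem.Str.lower l)) = true
    · simp only [h, if_true, ih, List.singleton_append]
    · simp only [h, if_false, ih, List.nil_append, Bool.false_eq_true]

-- constructor-shape lemmas for the candidate list and A's scans
theorem pvCand_cons_net (l : String) (rest : List String) (i0 : Int)
    (hn : PySem.Str.isIn "net::" l = true) :
    pvCandFrom i0 (l :: rest) = (0, i0, l) :: pvCandFrom (i0 + 1) rest := by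
  have hr : pvRank l = 0 := by unfold pvRank; rw [if_pos hn]
  simp only [pvCandFrom]
  rw [if_pos (by rw [hn, Bool.true_or]), hr]
  rfl

theorem pvCand_cons_timeout (l : String) (rest : List String) (i0 : Int)
    (hn : PySem.Str.isIn "net::" l = false)
    (ht : PySem.Str.isIn "timeout" (PySem.Str.lower l) = true) :
    pvCandFrom i0 (l :: rest) = (1, i0, l) :: pvCandFrom (i0 + 1) rest := by
  have hr : pvRank l = 1 := by unfold pvRank; rw [if_neg (by rw [hn]; exact Bool.false_ne_true)]
  simp only [pvCandFrom]
  rw [if_pos (by rw [hn, Bool.false_or, ht]), hr]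
  rfl

theorem pvCand_cons_skip (l : String) (rest : List String) (i0 : Int)
    (hn : PySem.Str.isIn "net::" l = false)
    (ht : PySem.Str.isIn "timeout" (PySem.Str.lower l) = false) :
    pvCandFrom i0 (l :: rest) = pvCandFrom (i0 + 1) rest := by
  simp only [pvCandFrom]
  rw [if_neg (by rw [hn, ht, Bool.false_or]; exact Bool.false_ne_true)]
  rfl

theorem pvFindNet_cons_pos (l : String) (rest : List String)
    (hn : PySem.Str.isIn "net::" l = true) :
    pvFindNet (l :: rest) = some l := by
  simp only [pvFindNet]
  rw [if_pos hn]

theorem pvFindNet_cons_neg (l : String) (rest : List String)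
    (hn : PySem.Str.isIn "net::" l = false) :
    pvFindNet (l :: rest) = pvFindNet rest := by
  simp only [pvFindNet]
  rw [if_neg (by rw [hn]; exact Bool.false_ne_true)]

theorem pvFindTimeout_cons_pos (l : String) (rest : List String)
    (ht : PySem.Str.isIn "timeout" (PySem.Str.lower l) = true) :
    pvFindTimeout (l :: rest) = some l := by
  simp only [pvFindTimeout]
  rw [if_pos ht]

theorem pvFindTimeout_cons_neg (l : String) (rest : List String)
    (ht : PySem.Str.isIn "timeout" (PySem.Str.lower l) = false) :
    pvFindTimeout (l :: rest) = pvFindTimeout rest := by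
  simp only [pvFindTimeout]
  rw [if_neg (by rw [ht]; exact Bool.false_ne_true)]

-- once the running best has rank 0 with an index below all remaining candidates, nothing replaces it
theorem pvMin_absorb (lines : List String) (i0 : Int) (b : Int × Int × String)
    (hb0 : b.1 = 0) (hbi : b.2.1 < i0) :
    (pvCandFrom i0 lines).foldl (fun best x => if pvLt x best then x else best) b = b := by
  induction lines generalizing i0 with
  | nil => rfl
  | cons l rest ih =>
    simp only [pvCandFrom, List.foldl_append]
    split_ifs with h
    · have hlt : pvLt (pvRank l, i0, l) b = false := by
        unfold pvLt pvRank
        split_ifs <;> simp_all <;> omega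
      simp only [List.foldl_cons, List.foldl_nil, hlt, if_neg Bool.false_ne_true]
      exact ih (i0 + 1) (by omega)
    · exact ih (i0 + 1) (by omega)

-- with a rank-1 running best from an earlier index, the fold finds the first net:: line if any, else keeps the best
theorem pvMin_rank1 (lines : List String) (i0 : Int) (b : Int × Int × String)
    (hb1 : b.1 = 1) (hbi : b.2.1 < i0) :
    (∀ m, pvFindNet lines = some m →
      ∃ j, (pvCandFrom i0 lines).foldl (fun best x => if pvLt x best then x else best) b = (0, j, m)) ∧
    (pvFindNet lines = none →
      (pvCandFrom i0 lines).foldl (fun best x => if pvLt x best then x else best) b = b) := by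
  induction lines generalizing i0 with
  | nil => exact ⟨fun m hm => by simp [pvFindNet] at hm, fun _ => rfl⟩
  | cons l rest ih =>
    by_cases hn : PySem.Str.isIn "net::" l = true
    · -- head is a net:: line: it displaces b and then absorbs
      have hlt : pvLt (0, i0, l) b = true := by
        unfold pvLt
        simp only [Bool.or_eq_true, Bool.and_eq_true, decide_eq_true_eq]
        left; omega
      constructor
      · intro m hm
        rw [pvFindNet_cons_pos l rest hn] at hm
        refine ⟨i0, ?_⟩
        rw [pvCand_cons_net l rest i0 hn, List.foldl_cons, if_pos hlt,
            pvMin_absorb rest (i0 + 1) (0, i0, l) rfl (by show i0 < i0 + 1; omega),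
            Option.some.inj hm]
      · intro hm
        rw [pvFindNet_cons_pos l rest hn] at hm
        exact absurd hm (by simp)
    · rw [Bool.not_eq_true] at hn
      by_cases ht : PySem.Str.isIn "timeout" (PySem.Str.lower l) = true
      · -- head is a timeout line: rank 1, later index — does not displace b
        have hlt : pvLt (1, i0, l) b = false := by
          rw [Bool.eq_false_iff]
          intro hcon
          unfold pvLt at hcon
          simp only [Bool.or_eq_true, Bool.and_eq_true, decide_eq_true_eq] at hcon
          rcases hcon with h | ⟨h1, h | ⟨h2, _⟩⟩ <;> omega
        constructor
        · intro m hm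
          rw [pvFindNet_cons_neg l rest hn] at hm
          obtain ⟨j, hj⟩ := (ih (i0 + 1) (by omega)).1 m hm
          refine ⟨j, ?_⟩
          rw [pvCand_cons_timeout l rest i0 hn ht, List.foldl_cons, if_neg (by rw [hlt]; exact Bool.false_ne_true), hj]
        · intro hm
          rw [pvFindNet_cons_neg l rest hn] at hm
          rw [pvCand_cons_timeout l rest i0 hn ht, List.foldl_cons, if_neg (by rw [hlt]; exact Bool.false_ne_true)]
          exact (ih (i0 + 1) (by omega)).2 hm
      · rw [Bool.not_eq_true] at ht
        constructor
        · intro m hm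
          rw [pvFindNet_cons_neg l rest hn] at hm
          obtain ⟨j, hj⟩ := (ih (i0 + 1) (by omega)).1 m hm
          refine ⟨j, ?_⟩
          rw [pvCand_cons_skip l rest i0 hn ht]
          exact hj
        · intro hm
          rw [pvFindNet_cons_neg l rest hn] at hm
          rw [pvCand_cons_skip l rest i0 hn ht]
          exact (ih (i0 + 1) (by omega)).2 hm

-- proof-side names for "min(candidates)[2] if candidates else None" and A's two-scan result
def pvSelect (cs : List (Int × Int × String)) : Option String :=
  match cs with
  | [] => none
  | c :: cs => some ((pvMinFold c cs).2.2)

def pvScanRes (lines : List String) : Option String :=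
  match pvFindNet lines with
  | some l => some l
  | none => pvFindTimeout lines

-- the selected minimum's line equals A's two-scan result
theorem pvCand_min_eq (lines : List String) (i0 : Int) :
    pvSelect (pvCandFrom i0 lines) = pvScanRes lines := by
  induction lines generalizing i0 with
  | nil => rfl
  | cons l rest ih =>
    by_cases hn : PySem.Str.isIn "net::" l = true
    · rw [pvCand_cons_net l rest i0 hn]
      unfold pvScanRes
      rw [pvFindNet_cons_pos l rest hn]
      simp only [pvSelect]
      unfold pvMinFold
      rw [pvMin_absorb rest (i0 + 1) (0, i0, l) rfl (by show i0 < i0 + 1; omega)]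
    · rw [Bool.not_eq_true] at hn
      by_cases ht : PySem.Str.isIn "timeout" (PySem.Str.lower l) = true
      · rw [pvCand_cons_timeout l rest i0 hn ht]
        unfold pvScanRes
        rw [pvFindNet_cons_neg l rest hn]
        simp only [pvSelect]
        unfold pvMinFold
        have hM := pvMin_rank1 rest (i0 + 1) (1, i0, l) rfl (by show i0 < i0 + 1; omega)
        cases hfn : pvFindNet rest with
        | some m =>
          obtain ⟨j, hj⟩ := hM.1 m hfn
          rw [hj]
        | none =>
          rw [hM.2 hfn, pvFindTimeout_cons_pos l rest ht]
      · rw [Bool.not_eq_true] at ht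
        rw [pvCand_cons_skip l rest i0 hn ht]
        have hs : pvScanRes (l :: rest) = pvScanRes rest := by
          unfold pvScanRes
          rw [pvFindNet_cons_neg l rest hn, pvFindTimeout_cons_neg l rest ht]
        rw [hs]
        exact ih (i0 + 1)

-- after the guard the two bodies agree
theorem pvBody_eq (msg : String) : pvBodyA msg = pvBodyB msg := by
  have ha : pvBodyA msg = (match pvScanRes (pvCleanLines msg) with
      | some l => l
      | none => pvHead msg (pvCleanLines msg)) := by
    unfold pvBodyA pvScanRes
    cases pvFindNet (pvCleanLines msg) with
    | some l => rfl
    | none => cases pvFindTimeout (pvCleanLines msg) <;> rfl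
  have hb : pvBodyB msg = (match pvSelect (pvCandFrom 0 (pvCleanLines msg)) with
      | some l => l
      | none => pvHead msg (pvCleanLines msg)) := by
    unfold pvBodyB pvCands
    rw [pvCands_eq_candFrom]
    cases pvCandFrom 0 (pvCleanLines msg) with
    | nil => rfl
    | cons c cs => rfl
  rw [ha, hb, pvCand_min_eq]

-- ===== VERDICT (by name: the statement is the Claim_ definition above) =====
theorem summarize_error_message_py_spec : Claim_equal_summarize_error_message_py := by
  intro message _
  unfold Spec_summarize_error_message_py summarize_error_message_py summarize_error_message_py_alt
  by_cases h : PySem.Str.len (PySem.Str.strip message) = 0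
  · rw [if_pos h, if_pos h]
  · rw [if_neg h, if_neg h]
    exact pvBody_eq _
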